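-- pv_equiv track=rewrite | github.com/atinjin/study | algorithm/anagrams/anagrams.py | count_convert_operations
-- ===== SOURCE A (Python) =====
-- def count_convert_operations(first, count_map):
--     """
--     12 3 3 3 3       345612
--     :param first:
--     :param count_map:
--     :return:
--     """
--     count = 0
--     for c in first:
--         cur_count = count_map.get(c, 0)
--         if cur_count > 0:
--             count_map[c] -= 1
--         else:
--             count += 1
--
--     return count
-- ===== SOURCE B (Python) =====
-- def count_convert_operations(first, count_map):
--     # Aggregate first into a frequency table, then one pass over the unique
--     # characters: use as much of count_map's budget as available per key.
--     need = {}
--     for c in first: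
--         need[c] = need.get(c, 0) + 1
--     count = 0
--     for c, n in need.items():
--         avail = count_map.get(c, 0)
--         use = min(avail, n) if avail > 0 else 0
--         if use > 0:
--             count_map[c] -= use
--         count += n - use
--     return count
-- ===== Notes on version B (the rewrite author's own statement) =====
-- stated objective: alternative
-- what changed: A does a per-character pass over first, looking up and decrementing count_map once per occurrence; B first aggregates first into a frequency table and then does one budget subtraction (use = min(avail, n)) per distinct character, applying the whole decrement for a key at once.
import Mathlib
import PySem

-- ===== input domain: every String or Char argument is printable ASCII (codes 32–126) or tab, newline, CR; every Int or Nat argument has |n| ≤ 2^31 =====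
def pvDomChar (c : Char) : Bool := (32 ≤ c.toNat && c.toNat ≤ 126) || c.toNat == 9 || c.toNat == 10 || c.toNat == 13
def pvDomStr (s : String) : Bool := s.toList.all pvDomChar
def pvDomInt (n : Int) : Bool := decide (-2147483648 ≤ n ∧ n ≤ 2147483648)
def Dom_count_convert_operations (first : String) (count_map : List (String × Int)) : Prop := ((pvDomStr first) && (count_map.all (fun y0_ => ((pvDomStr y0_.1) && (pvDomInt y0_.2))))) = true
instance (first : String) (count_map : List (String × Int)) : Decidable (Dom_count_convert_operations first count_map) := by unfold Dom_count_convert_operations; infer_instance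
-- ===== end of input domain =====

-- B replaces A's per-character pass (lookup + decrement-or-count for every char) by
-- aggregating `first` into a frequency table and doing one budget subtraction per
-- DISTINCT character (objective: alternative decomposition, same cost).
-- Both programs mutate count_map in place identically; the equivalence proved here is
-- about the RETURN value (the Lean ports thread the dict as state and return the count).

-- ===== PORT A =====
-- loop body of A: cur_count = count_map.get(c, 0); if >0 decrement else count += 1
def pvStepA (st : Int × PySem.Dict String Int) (s : String) : Int × PySem.Dict String Int :=
  let cur := st.2.getD s 0
  if cur > 0 then (st.1, st.2.insert s (cur - 1)) else (st.1 + 1, st.2)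

def count_convert_operations (first : String) (count_map : List (String × Int)) : Int :=
  (first.toList.foldl (fun st c => pvStepA st (String.ofList [c])) (0, PySem.Dict.mk count_map)).1

-- ===== PORT B =====
-- loop body of B's second pass: avail = count_map.get(c,0); use = min(avail,n) if avail>0 else 0;
-- if use>0: count_map[c] -= use; count += n - use
def pvStepB (st : Int × PySem.Dict String Int) (p : String × Int) : Int × PySem.Dict String Int :=
  let avail := st.2.getD p.1 0
  let use := if avail > 0 then min avail p.2 else 0
  (st.1 + (p.2 - use), if use > 0 then st.2.insert p.1 (avail - use) else st.2)

def count_convert_operations_alt (first : String) (count_map : List (String × Int)) : Int :=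
  let need := first.toList.foldl
    (fun d c => d.insert (String.ofList [c]) (d.getD (String.ofList [c]) 0 + 1)) PySem.Dict.empty
  (need.items.foldl pvStepB (0, PySem.Dict.mk count_map)).1

-- ===== PRECONDITION & SPEC =====
def Spec_count_convert_operations (first : String) (count_map : List (String × Int)) (out : Int) : Prop := out = count_convert_operations_alt first count_map
instance (first : String) (count_map : List (String × Int)) (out : Int) : Decidable (Spec_count_convert_operations first count_map out) := by unfold Spec_count_convert_operations; infer_instance

-- ===== CLAIM (what is proved, stated in full; the proofs are below) =====
def Claim_equal_count_convert_operations : Prop := ∀ (first : String) (count_map : List (String × Int)), Dom_count_convert_operations first count_map → Spec_count_convert_operations first count_map (count_convert_operations first count_map)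

-- ===== LEMMAS AND PROOFS =====

-- per-key contribution to the result, relative to the ORIGINAL map
def pvG (cm : PySem.Dict String Int) (s : String) (n : Int) : Int :=
  n - (if cm.getD s 0 > 0 then min (cm.getD s 0) n else 0)

-- A's loop counts, per key, the occurrences not covered by the key's positive budget
theorem pvA_loop (ms : List String) (S : Finset String) (hms : ∀ s ∈ ms, s ∈ S) :
    ∀ (d : PySem.Dict String Int) (k : Int),
      (ms.foldl pvStepA (k, d)).1 = k + ∑ s ∈ S, pvG d s (ms.count s) := by
  induction ms with
  | nil =>
    intro d k
    simp only [List.foldl_nil, List.count_nil, Int.natCast_zero]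
    rw [Finset.sum_eq_zero (fun s _ => by simp only [pvG]; split_ifs <;> omega)]
    ring
  | cons x rest ih =>
    intro d k
    have hx : x ∈ S := hms x (by simp)
    have hrest : ∀ s ∈ rest, s ∈ S := fun s hs => hms s (by simp [hs])
    simp only [List.foldl_cons]
    by_cases h : d.getD x 0 > 0
    · rw [show pvStepA (k, d) x = (k, d.insert x (d.getD x 0 - 1)) by
        simp [pvStepA, h]]
      rw [ih hrest]
      congr 1
      apply Finset.sum_congr rfl
      intro s _
      by_cases hsx : s = x
      · subst hsx
        simp only [pvG, PySem.Dict.getD_insert_self, List.count_cons_self]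
        push_cast
        split_ifs <;> omega
      · simp only [pvG]
        rw [PySem.Dict.getD_insert_of_ne _ _ _ hsx]
        have hxs : ¬ x = s := fun hh => hsx hh.symm
        simp [hxs]
    · rw [show pvStepA (k, d) x = (k + 1, d) by simp [pvStepA, h]]
      rw [ih hrest]
      have hterm : ∀ s ∈ S, pvG d s (((x :: rest).count s : Int))
          = pvG d s ((rest.count s : Int)) + (if s = x then (1:Int) else 0) := by
        intro s _
        by_cases hsx : s = x
        · subst hsx
          simp only [pvG, List.count_cons_self]
          push_cast
          split_ifs
          omega
        · have hxs : ¬ x = s := fun hh => hsx hh.symm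
          simp [pvG, hsx, hxs]
      rw [Finset.sum_congr rfl hterm, Finset.sum_add_distrib,
        Finset.sum_ite_eq' S x (fun _ => (1:Int)), if_pos hx]
      ring

-- B's loop over pairs with distinct keys: the threaded mutation of the dict never
-- affects a later lookup, so the count is the sum of pvG over the original dict
theorem pvB_loop (pairs : List (String × Int)) (hnd : (pairs.map Prod.fst).Nodup) :
    ∀ (cm : PySem.Dict String Int) (k : Int),
      (pairs.foldl pvStepB (k, cm)).1 = k + (pairs.map (fun p => pvG cm p.1 p.2)).sum := by
  induction pairs with
  | nil => intro cm k; simp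
  | cons p rest ih =>
    intro cm k
    simp only [List.map_cons, List.nodup_cons] at hnd
    have hnotin : p.1 ∉ rest.map Prod.fst := hnd.1
    simp only [List.foldl_cons, List.map_cons, List.sum_cons]
    set avail := cm.getD p.1 0 with havail
    set use := if avail > 0 then min avail p.2 else 0 with huse
    have hstep : pvStepB (k, cm) p
        = (k + (p.2 - use), if use > 0 then cm.insert p.1 (avail - use) else cm) := rfl
    rw [hstep, ih hnd.2]
    have hmap : rest.map (fun q => pvG (if use > 0 then cm.insert p.1 (avail - use) else cm) q.1 q.2)
        = rest.map (fun q => pvG cm q.1 q.2) := by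
      apply List.map_congr_left
      intro q hq
      have hne : q.1 ≠ p.1 := by
        intro hEq
        exact hnotin (hEq ▸ List.mem_map_of_mem hq)
      by_cases hu : use > 0
      · rw [if_pos hu]
        simp only [pvG]
        rw [PySem.Dict.getD_insert_of_ne _ _ _ hne]
      · rw [if_neg hu]
    rw [hmap]
    have hg : pvG cm p.1 p.2 = p.2 - use := rfl
    rw [hg]; ring

-- ===== VERDICT (by name: the statement is the Claim_ definition above) =====
theorem count_convert_operations_spec : Claim_equal_count_convert_operations := by
  intro first count_map _
  unfold Spec_count_convert_operations count_convert_operations count_convert_operations_alt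
  set ms : List String := first.toList.map (fun c => String.ofList [c]) with hms
  set D := PySem.Dict.mk count_map
  -- A's fold over chars is the fold of pvStepA over ms
  have hA : (first.toList.foldl (fun st c => pvStepA st (String.ofList [c])) (0, D)).1
      = (ms.foldl pvStepA (0, D)).1 := by
    rw [hms, List.foldl_map]
  -- B's first fold builds counter ms
  have hneed : first.toList.foldl
      (fun d c => d.insert (String.ofList [c]) (d.getD (String.ofList [c]) 0 + 1)) PySem.Dict.empty
      = PySem.Dict.counter ms := by
    rw [hms, ← PySem.Dict.foldl_insert_getD_add_one_eq_counter, List.foldl_map]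
  rw [hA, hneed, pvA_loop ms ((PySem.List.dedup ms).toFinset)
        (fun s hs => by simp [List.mem_toFinset, hs])]
  rw [pvB_loop (PySem.Dict.counter ms).items (by
        rw [PySem.Dict.items_counter, List.map_map]
        simp [Function.comp_def, PySem.Set.nodup_ofList])]
  rw [PySem.Dict.items_counter]
  rw [List.map_map]
  have : ((PySem.Set.ofList ms).map ((fun p : String × Int => pvG D p.1 p.2) ∘ fun k => (k, (ms.count k : Int)))).sum
      = ∑ s ∈ (PySem.List.dedup ms).toFinset, pvG D s (ms.count s) := by
    rw [List.sum_toFinset _ (by simp [PySem.Set.nodup_ofList])]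
    simp [Function.comp_def, PySem.List.dedup_eq_ofList]
  rw [this]
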